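-- pv_equiv track=rewrite | github.com/pgbarletta/topview | topview/services/system_info_selection.py | _build_atom_serials_by_type
-- ===== SOURCE A (Python) =====
-- from typing import Dict, List, Optional, Sequence, Tuple
--
-- def _build_atom_serials_by_type(
--     atom_type_indices: Sequence[int],
-- ) -> Dict[int, List[int]]:
--     atom_serials_by_type: Dict[int, List[int]] = {}
--     for idx, type_index in enumerate(atom_type_indices):
--         if type_index is None:
--             continue
--         try:
--             type_int = int(type_index)
--         except (TypeError, ValueError):
--             continue
--         if type_int <= 0:
--             continue
--         serial = idx + 1
--         atom_serials_by_type.setdefault(type_int, []).append(serial)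
--     return atom_serials_by_type
-- ===== SOURCE B (Python) =====
-- def _build_atom_serials_by_type(atom_type_indices):
--     # Pass 1: collect valid (type_int, serial) pairs with the same guards as A.
--     pairs = []
--     for idx, t in enumerate(atom_type_indices):
--         if t is None:
--             continue
--         try:
--             ti = int(t)
--         except (TypeError, ValueError):
--             continue
--         if ti > 0:
--             pairs.append((ti, idx + 1))
--     # Pass 2: distinct keys in first-occurrence order, then gather each group.
--     keys = list(dict.fromkeys(k for k, _ in pairs))
--     return {k: [s for kk, s in pairs if kk == k] for k in keys}
-- ===== Notes on version B (the rewrite author's own statement) =====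
-- stated objective: alternative
-- what changed: A builds the dict incrementally with setdefault-append in one loop; B first materialises the valid (type,serial) pairs, computes the distinct keys in first-occurrence order, then builds each group by a per-key scan (dict comprehension), with no dict mutated during the main loop.
import Mathlib
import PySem

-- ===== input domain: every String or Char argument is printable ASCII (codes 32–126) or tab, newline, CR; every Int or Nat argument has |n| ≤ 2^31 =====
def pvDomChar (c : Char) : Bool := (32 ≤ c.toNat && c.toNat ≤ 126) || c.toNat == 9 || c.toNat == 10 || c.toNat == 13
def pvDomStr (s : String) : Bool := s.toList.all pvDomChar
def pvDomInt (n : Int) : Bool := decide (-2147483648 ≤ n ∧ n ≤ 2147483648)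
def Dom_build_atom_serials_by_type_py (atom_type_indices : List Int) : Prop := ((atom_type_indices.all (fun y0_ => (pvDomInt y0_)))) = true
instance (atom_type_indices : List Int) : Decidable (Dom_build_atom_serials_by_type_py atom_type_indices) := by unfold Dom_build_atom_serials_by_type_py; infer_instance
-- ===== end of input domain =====

-- B replaces A's single setdefault-append dict loop by: collect valid (type, serial)
-- pairs, dedup the keys in first-occurrence order, then gather each group by a per-key
-- scan (alternative decomposition; return values proved equal).

-- ===== PORT A =====
-- setdefault(k, []).append(s) on the dict is exactly Dict.modify k [] (· ++ [s])
def build_atom_serials_by_type_py (atom_type_indices : List Int) : List (Int × List Int) :=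
  ((PySem.List.enumerate atom_type_indices 0).foldl
    (fun (d : PySem.Dict Int (List Int)) p =>
      if p.2 ≤ 0 then d else d.modify p.2 [] (· ++ [p.1 + 1]))
    PySem.Dict.empty).items

-- ===== PORT B =====
def build_atom_serials_by_type_py_alt (atom_type_indices : List Int) : List (Int × List Int) :=
  let pairs := (PySem.List.enumerate atom_type_indices 0).foldl
    (fun (acc : List (Int × Int)) p => if p.2 > 0 then acc ++ [(p.2, p.1 + 1)] else acc) []
  let keys := PySem.List.dedup (pairs.map (·.1))
  keys.map (fun k => (k, (pairs.filter (fun q => q.1 == k)).map (·.2)))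

-- ===== PRECONDITION & SPEC =====
def Spec_build_atom_serials_by_type_py (atom_type_indices : List Int) (out : List (Int × List Int)) : Prop := out = build_atom_serials_by_type_py_alt atom_type_indices
instance (atom_type_indices : List Int) (out : List (Int × List Int)) : Decidable (Spec_build_atom_serials_by_type_py atom_type_indices out) := by unfold Spec_build_atom_serials_by_type_py; infer_instance

-- ===== CLAIM (what is proved, stated in full; the proofs are below) =====
def Claim_equal_build_atom_serials_by_type_py : Prop := ∀ (atom_type_indices : List Int), Dom_build_atom_serials_by_type_py atom_type_indices → Spec_build_atom_serials_by_type_py atom_type_indices (build_atom_serials_by_type_py atom_type_indices)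

-- ===== LEMMAS AND PROOFS =====

-- A's guarded dict loop equals the modify-fold over B's pair list.
theorem pvA_fold_eq (e : List (Int × Int)) (d : PySem.Dict Int (List Int)) :
    (e.foldl (fun (d : PySem.Dict Int (List Int)) p =>
        if p.2 ≤ 0 then d else d.modify p.2 [] (· ++ [p.1 + 1])) d)
    = (((e.filter (fun p => decide (p.2 > 0))).map (fun p => (p.2, p.1 + 1))).foldl
        (fun (d : PySem.Dict Int (List Int)) q => d.modify q.1 [] (· ++ [q.2])) d) := by
  induction e generalizing d with
  | nil => rfl
  | cons x t ih =>
    by_cases h : x.2 ≤ 0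
    · have h' : ¬ (x.2 > 0) := by omega
      simp only [List.foldl_cons, List.filter_cons, h', decide_false, if_pos h]
      exact ih d
    · have h' : x.2 > 0 := by omega
      simp only [List.foldl_cons, List.filter_cons, h', decide_true, if_neg h]
      exact ih _

-- ===== VERDICT (by name: the statement is the Claim_ definition above) =====
theorem build_atom_serials_by_type_py_spec : Claim_equal_build_atom_serials_by_type_py := by
  intro xs _
  unfold Spec_build_atom_serials_by_type_py build_atom_serials_by_type_py build_atom_serials_by_type_py_alt
  rw [PySem.List.foldl_append_ite (p := fun p : Int × Int => p.2 > 0)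
      (f := fun p : Int × Int => (p.2, p.1 + 1))]
  simp only [List.nil_append]
  set pairs := ((PySem.List.enumerate xs 0).filter (fun p => decide (p.2 > 0))).map
      (fun p => (p.2, p.1 + 1)) with hpairs
  rw [pvA_fold_eq _ PySem.Dict.empty, ← hpairs]
  have hnd : (pairs.foldl (fun (d : PySem.Dict Int (List Int)) q =>
      d.modify q.1 [] (· ++ [q.2])) PySem.Dict.empty).keys.Nodup := by
    exact PySem.Dict.nodup_keys_foldl_modify_key pairs Prod.fst []
      (fun d q => (· ++ [q.2])) PySem.Dict.empty (by simp)
  rw [PySem.Dict.items_eq_map_keys _ hnd []]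
  rw [PySem.Dict.keys_foldl_modify_key (key := Prod.fst)]
  have hkeys : PySem.Set.update (PySem.Dict.empty : PySem.Dict Int (List Int)).keys
      (pairs.map Prod.fst) = PySem.List.dedup (pairs.map (·.1)) := by
    simp [PySem.Set.update, PySem.Set.ofList_eq_foldl]
  rw [hkeys]
  apply List.map_congr_left
  intro k _
  rw [PySem.Dict.getD_foldl_modify_append]
  simp
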